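-- pv_equiv track=rewrite | github.com/AmanuelD02/Competitive-Programming | 936-stamping-the-sequence/936-stamping-the-sequence.py | movesToStamp
-- ===== SOURCE A (Python) =====
-- from typing import List
--
-- def movesToStamp(stamp: str, target: str) -> List[int]:
--     stamp = [x for x in stamp]
--     target = [x for x in target]
--     def canReplace(start):
--         for i in range(start,start + len(stamp)):
--             if not(target[i] == '?' or target[i] ==stamp[ (i-start)]):
--                 return False
--         return True
--
--     def replace(start):
--         count = 0
--         for i in range(start, start + len(stamp)):
--             if target[i] != '?':
--                 count += 1
--                 target[i] ='?'
--         return count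
--
--     ans = []
--     count = 0
--     T = len(target)
--     visited = [False] * T
--
--     while count < T:
--         didChange = False
--         for i in range(T-len(stamp)+1):
--             if not visited[i] and canReplace(i):
--                 visited[i] = True
--                 count += replace(i)
--                 didChange = True
--                 ans.append(i)
--         if not didChange:
--             return []
--
--
--     return ans[::-1]
-- ===== SOURCE B (Python) =====
-- def movesToStamp(stamp, target):
--     # Incremental per-window mismatch counts instead of rescanning each window
--     # every round; answer is built by prepending, so no final reversal.
--     M = len(stamp)
--     N = len(target)
--     W = N - M + 1
--     t = list(target)
--     miss = []
--     for w in range(W):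
--         c = 0
--         for k in range(M):
--             if t[w + k] != '?' and t[w + k] != stamp[k]:
--                 c += 1
--         miss.append(c)
--     visited = [False] * W
--     ans = []
--     count = 0
--     while count < N:
--         didChange = False
--         for i in range(W):
--             if not visited[i] and miss[i] == 0:
--                 visited[i] = True
--                 didChange = True
--                 ans = [i] + ans
--                 for k in range(M):
--                     j = i + k
--                     if t[j] != '?':
--                         count += 1
--                         lo = j - M + 1
--                         if lo < 0:
--                             lo = 0
--                         hi = j
--                         if hi > W - 1:
--                             hi = W - 1
--                         for w in range(lo, hi + 1):
--                             if stamp[j - w] != t[j]: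
--                                 miss[w] -= 1
--                         t[j] = '?'
--         if not didChange:
--             return []
--     return ans
-- ===== Notes on version B (the rewrite author's own statement) =====
-- stated objective: alternative
-- what changed: Instead of rescanning every window with canReplace each round (and reversing the answer at the end), B precomputes a per-window mismatch counter and updates the counters of the O(M) overlapping windows whenever a character is replaced, so a window test becomes O(1); the answer is built by prepending, with the same left-to-right rounds and identical output. (Pre_ excludes the empty-stamp/non-empty-target inputs, where A raises IndexError.)
import Mathlib
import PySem

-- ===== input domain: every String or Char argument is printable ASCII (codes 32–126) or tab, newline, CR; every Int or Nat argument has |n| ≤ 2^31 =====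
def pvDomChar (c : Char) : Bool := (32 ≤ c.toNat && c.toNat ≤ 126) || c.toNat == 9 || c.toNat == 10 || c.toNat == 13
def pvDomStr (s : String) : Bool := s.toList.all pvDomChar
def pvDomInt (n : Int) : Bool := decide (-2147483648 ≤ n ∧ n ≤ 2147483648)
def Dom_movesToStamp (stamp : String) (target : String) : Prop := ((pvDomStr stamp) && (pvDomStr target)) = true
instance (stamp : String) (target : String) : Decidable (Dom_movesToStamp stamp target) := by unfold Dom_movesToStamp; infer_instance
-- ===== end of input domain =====

-- B replaces A's per-round O(M) window rescans by incrementally maintained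
-- per-window mismatch counters (same left-to-right rounds), and builds the
-- answer by prepending instead of appending-then-reversing.

-- ===== PORT A =====

-- list indexing xs[j]; all indices reached under Pre_ are in range (an
-- out-of-range access is a Python IndexError, excluded by Pre_)
def gC (xs : List Char) (j : Nat) : Char := xs.getD j '?'

-- `for i in range(start, start+len(stamp)): if not(target[i]=='?' or target[i]==stamp[i-start]): return False`
-- (rem = iterations left, k = i - start)
def canGo (S t : List Char) (start : Nat) : Nat → Nat → Bool
  | 0, _ => true
  | rem+1, k =>
      if gC t (start+k) = '?' ∨ gC t (start+k) = gC S k then canGo S t start rem (k+1)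
      else false

-- `replace(start)`: state (count, target)
def repGo (start : Nat) : Nat → Nat → Int × List Char → Int × List Char
  | 0, _, st => st
  | rem+1, k, (c, t) =>
      repGo start rem (k+1)
        (if gC t (start+k) ≠ '?' then (c+1, t.set (start+k) '?') else (c, t))

-- one `for i in range(T-len(stamp)+1)` round; state (target, visited, count, ans, didChange)
def roundA (S : List Char) : Nat → Nat → (List Char × List Bool × Int × List Int × Bool) →
    (List Char × List Bool × Int × List Int × Bool)
  | 0, _, st => st
  | rem+1, i, (t, v, c, a, d) =>
      roundA S rem (i+1)
        (if v.getD i false = false ∧ canGo S t i S.length 0 = true then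
          let r := repGo i S.length 0 (0, t)
          (r.2, v.set i true, c + r.1, a ++ [(i : Int)], true)
        else (t, v, c, a, d))

-- the `while count < T` loop; the Nat fuel is a totality guard only
-- (the loop runs at most W+1 ≤ T+1 rounds, so fuel T+2 is never exhausted)
def loopA (S : List Char) (T : Int) (W : Nat) : Nat → (List Char × List Bool × Int × List Int) → List Int
  | 0, _ => []
  | fuel+1, (t, v, c, a) =>
      if c < T then
        match roundA S W 0 (t, v, c, a, false) with
        | (t', v', c', a', d) => if d then loopA S T W fuel (t', v', c', a') else []
      else a.reverse

def movesToStamp (stamp : String) (target : String) : List Int :=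
  let S := stamp.toList
  let t := target.toList
  let T : Int := (t.length : Int)
  -- range(T - len(stamp) + 1): empty when the bound is ≤ 0, hence .toNat
  let W : Nat := (T - (S.length : Int) + 1).toNat
  loopA S T W (t.length + 2) (t, List.replicate t.length false, 0, [])

-- ===== PORT B =====

-- inner `for k in range(M)` of the miss-initialisation: accumulator c
def mcntGo (S t : List Char) (w : Nat) : Nat → Nat → Int → Int
  | 0, _, c => c
  | rem+1, k, c =>
      mcntGo S t w rem (k+1)
        (if gC t (w+k) ≠ '?' ∧ gC t (w+k) ≠ gC S k then c+1 else c)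

def mcnt (S t : List Char) (w : Nat) : Int := mcntGo S t w S.length 0 0

-- `for w in range(W): … miss.append(c)`
def missInit (S t : List Char) : Nat → Nat → List Int → List Int
  | 0, _, ms => ms
  | rem+1, w, ms => missInit S t rem (w+1) (ms ++ [mcnt S t w])

-- `for w in range(lo, hi+1): if stamp[j-w] != t[j]: miss[w] -= 1`  (ch = t[j])
def decGo (S : List Char) (ch : Char) (j : Nat) : Nat → Nat → List Int → List Int
  | 0, _, ms => ms
  | rem+1, w, ms =>
      decGo S ch j rem (w+1)
        (if gC S (j-w) ≠ ch then ms.set w (ms.getD w 0 - 1) else ms)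

-- `for k in range(M): …` stamping at window i; state (target, count, miss)
def stampGo (S : List Char) (W : Nat) (i : Nat) : Nat → Nat → (List Char × Int × List Int) →
    (List Char × Int × List Int)
  | 0, _, st => st
  | rem+1, k, (t, c, ms) =>
      stampGo S W i rem (k+1)
        (if gC t (i+k) ≠ '?' then
          -- lo = max(0, j-M+1) via Nat clamping; hi = min(W-1, j)
          let lo := i + k + 1 - S.length
          let hi := min (i + k) (W - 1)
          (t.set (i+k) '?', c+1, decGo S (gC t (i+k)) (i+k) (hi + 1 - lo) lo ms)
        else (t, c, ms))

-- one round; state (target, visited, count, miss, ans, didChange)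
def roundB (S : List Char) (W : Nat) : Nat → Nat → (List Char × List Bool × Int × List Int × List Int × Bool) →
    (List Char × List Bool × Int × List Int × List Int × Bool)
  | 0, _, st => st
  | rem+1, i, (t, v, c, ms, a, d) =>
      roundB S W rem (i+1)
        (if v.getD i false = false ∧ ms.getD i 0 = 0 then
          let r := stampGo S W i S.length 0 (t, c, ms)
          (r.1, v.set i true, r.2.1, r.2.2, (i : Int) :: a, true)
        else (t, v, c, ms, a, d))

-- the `while count < N` loop; fuel is the same totality guard as in port A
def loopB (S : List Char) (N : Int) (W : Nat) : Nat → (List Char × List Bool × Int × List Int × List Int) → List Int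
  | 0, _ => []
  | fuel+1, (t, v, c, ms, a) =>
      if c < N then
        match roundB S W W 0 (t, v, c, ms, a, false) with
        | (t', v', c', ms', a', d) => if d then loopB S N W fuel (t', v', c', ms', a') else []
      else a

def movesToStamp_alt (stamp : String) (target : String) : List Int :=
  let S := stamp.toList
  let t := target.toList
  let N : Int := (t.length : Int)
  let W : Nat := (N - (S.length : Int) + 1).toNat
  loopB S N W (t.length + 2) (t, List.replicate W false, 0, missInit S t W 0 [], [])

-- ===== PRECONDITION & SPEC =====
-- Pre_ excludes only inputs where A raises: with an empty stamp and non-empty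
-- target, A's `visited[i]` hits index T and raises IndexError.
def Pre_movesToStamp (stamp : String) (target : String) : Prop :=
  stamp ≠ "" ∨ target = ""
instance (stamp : String) (target : String) : Decidable (Pre_movesToStamp stamp target) := by
  unfold Pre_movesToStamp; infer_instance

def pvWitness_movesToStamp : String × String := ("abc", "ababc")

def Spec_movesToStamp (stamp : String) (target : String) (out : List Int) : Prop := out = movesToStamp_alt stamp target
instance (stamp : String) (target : String) (out : List Int) : Decidable (Spec_movesToStamp stamp target out) := by unfold Spec_movesToStamp; infer_instance

-- ===== CLAIM (what is proved, stated in full; the proofs are below) =====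
def Claim_equal_movesToStamp : Prop := ∀ (stamp : String) (target : String), Dom_movesToStamp stamp target → Pre_movesToStamp stamp target → Spec_movesToStamp stamp target (movesToStamp stamp target)
-- ===== LEMMAS AND PROOFS =====

-- the list of per-window mismatch counts B's miss array must always equal
def vecOf (S t : List Char) (W : Nat) : List Int := (List.range W).map (fun w => mcnt S t w)

theorem missInit_eq (S t : List Char) : ∀ rem w ms,
    missInit S t rem w ms = ms ++ (List.range' w rem).map (fun x => mcnt S t x) := by
  intro rem
  induction rem with
  | zero => intro w ms; simp [missInit]
  | succ n ih => intro w ms; simp [missInit, List.range'_succ, ih]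

theorem mcntGo_acc (S t : List Char) (w : Nat) : ∀ rem k c,
    mcntGo S t w rem k c = c + mcntGo S t w rem k 0 := by
  intro rem
  induction rem with
  | zero => intro k c; simp [mcntGo]
  | succ n ih =>
      intro k c
      simp only [mcntGo]
      split_ifs with hP
      · rw [ih (k+1) (c+1), ih (k+1) (0+1)]; ring
      · exact ih (k+1) c

theorem mcntGo_nonneg (S t : List Char) (w : Nat) : ∀ rem k, 0 ≤ mcntGo S t w rem k 0 := by
  intro rem
  induction rem with
  | zero => intro k; simp [mcntGo]
  | succ n ih =>
      intro k
      simp only [mcntGo]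
      rw [mcntGo_acc]
      have := ih (k+1)
      split_ifs <;> omega

theorem canGo_iff (S t : List Char) (i : Nat) : ∀ rem k,
    (canGo S t i rem k = true) ↔ mcntGo S t i rem k 0 = 0 := by
  intro rem
  induction rem with
  | zero => intro k; simp [canGo, mcntGo]
  | succ n ih =>
      intro k
      simp only [canGo, mcntGo]
      by_cases h : gC t (i+k) = '?' ∨ gC t (i+k) = gC S k
      · have h2 : ¬ (gC t (i+k) ≠ '?' ∧ gC t (i+k) ≠ gC S k) := by tauto
        simp [h, h2, ih]
      · have h2 : gC t (i+k) ≠ '?' ∧ gC t (i+k) ≠ gC S k := by tauto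
        have h3 := mcntGo_nonneg S t i n (k+1)
        rw [mcntGo_acc, if_neg h, if_pos h2]
        simp only [Bool.false_eq_true, false_iff]
        omega

theorem decGo_getElem? (S : List Char) (ch : Char) (j : Nat) : ∀ rem lo ms (w : Nat),
    (decGo S ch j rem lo ms)[w]? =
      if lo ≤ w ∧ w < lo + rem ∧ gC S (j-w) ≠ ch then (ms[w]?).map (fun x => x - 1)
      else ms[w]? := by
  intro rem
  induction rem with
  | zero =>
      intro lo ms w
      rw [decGo, if_neg (by omega)]
  | succ n ih =>
      intro lo ms w
      rw [decGo, ih]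
      by_cases hw : w = lo
      · subst hw
        rw [if_neg (by omega)]
        by_cases hP : gC S (j-w) ≠ ch
        · rw [if_pos hP,
              if_pos (show w ≤ w ∧ w < w + (n+1) ∧ gC S (j-w) ≠ ch from ⟨le_rfl, by omega, hP⟩)]
          rw [List.getElem?_set, if_pos rfl]
          by_cases hl : w < ms.length
          · rw [if_pos hl]
            have : ms[w]? = some (ms[w]'hl) := List.getElem?_eq_getElem hl
            rw [this]
            simp [List.getD_eq_getElem?_getD, this]
          · rw [if_neg hl]
            have : ms[w]? = none := by
              simp; omega
            simp [this]
        · rw [if_neg hP, if_neg (by tauto)]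
      · have hset : ∀ (ms' : List Int) (x : Int), (ms'.set lo x)[w]? = ms'[w]? := by
          intro ms' x; rw [List.getElem?_set, if_neg (by omega)]
        by_cases hP : gC S (j-lo) ≠ ch
        · rw [if_pos hP, hset]
          congr 1
          simp only [eq_iff_iff]
          constructor <;> (intro ⟨h1,h2,h3⟩; exact ⟨by omega, by omega, h3⟩)
        · rw [if_neg hP]
          congr 1
          simp only [eq_iff_iff]
          constructor <;> (intro ⟨h1,h2,h3⟩; exact ⟨by omega, by omega, h3⟩)

theorem gC_set_ne (t : List Char) (j m : Nat) (x : Char) (h : m ≠ j) :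
    gC (t.set j x) m = gC t m := by
  simp only [gC, List.getD_eq_getElem?_getD, List.getElem?_set, if_neg (Ne.symm h)]

theorem gC_set_self (t : List Char) (j : Nat) (x : Char) (hj : j < t.length) :
    gC (t.set j x) j = x := by
  simp [gC, List.getD_eq_getElem?_getD, hj]

theorem mcntGo_set (S t : List Char) (j : Nat) (hj : j < t.length) (hch : gC t j ≠ '?') (w : Nat) :
    ∀ rem k, mcntGo S (t.set j '?') w rem k 0 =
      if w + k ≤ j ∧ j < w + k + rem ∧ gC S (j-w) ≠ gC t j
      then mcntGo S t w rem k 0 - 1 else mcntGo S t w rem k 0 := by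
  intro rem
  induction rem with
  | zero => intro k; rw [if_neg (by omega)]; simp [mcntGo]
  | succ n ih =>
      intro k
      simp only [mcntGo]
      by_cases hk : w + k = j
      · have hk' : j - w = k := by omega
        have h1 : gC (t.set j '?') (w+k) = '?' := by rw [hk]; exact gC_set_self t j '?' hj
        have h2 : gC t (w+k) = gC t j := by rw [hk]
        rw [if_neg (by simp [h1])]
        rw [ih (k+1), if_neg (show ¬ (w + (k+1) ≤ j ∧ j < w + (k+1) + n ∧ gC S (j-w) ≠ gC t j) by omega)]
        by_cases hQ : gC S (j-w) ≠ gC t j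
        · rw [if_pos (show gC t (w+k) ≠ '?' ∧ gC t (w+k) ≠ gC S k from
              ⟨by rw [h2]; exact hch, by rw [h2, ← hk']; exact fun h => hQ h.symm⟩)]
          rw [mcntGo_acc S t w n (k+1) (0+1)]
          rw [if_pos ⟨by omega, by omega, hQ⟩]
          omega
        · have hQ' : gC S k = gC t j := by rw [← hk']; exact not_ne_iff.mp hQ
          rw [if_neg (show ¬ (gC t (w+k) ≠ '?' ∧ gC t (w+k) ≠ gC S k) from
              fun h => h.2 (by rw [h2, hQ']))]
          rw [if_neg (by tauto)]
      · rw [gC_set_ne t j (w+k) '?' hk]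
        rw [mcntGo_acc S (t.set j '?') w n (k+1), ih (k+1)]
        have hCC : (w + (k+1) ≤ j ∧ j < w + (k+1) + n ∧ gC S (j-w) ≠ gC t j)
            ↔ (w + k ≤ j ∧ j < w + k + (n+1) ∧ gC S (j-w) ≠ gC t j) := by
          constructor <;> (rintro ⟨a,b,c⟩; exact ⟨by omega, by omega, c⟩)
        simp only [hCC]
        rw [mcntGo_acc S t w n (k+1) (if gC t (w+k) ≠ '?' ∧ gC t (w+k) ≠ gC S k then 0+1 else 0)]
        split_ifs <;> omega

theorem mcnt_set (S t : List Char) (j : Nat) (hj : j < t.length) (hch : gC t j ≠ '?') (w : Nat) :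
    mcnt S (t.set j '?') w =
      if w ≤ j ∧ j < w + S.length ∧ gC S (j-w) ≠ gC t j then mcnt S t w - 1
      else mcnt S t w := by
  have := mcntGo_set S t j hj hch w S.length 0
  simpa [mcnt] using this

theorem vecOf_getElem? (S t : List Char) (W w : Nat) :
    (vecOf S t W)[w]? = if w < W then some (mcnt S t w) else none := by
  simp [vecOf, List.getElem?_map]
  split_ifs with h
  · rw [List.getElem?_eq_getElem (by simpa using h)]
    simp
  · rw [List.getElem?_eq_none (by simpa using h)]
    rfl

theorem decGo_vecOf (S t : List Char) (W j : Nat) (hj : j < t.length) (hch : gC t j ≠ '?') :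
    decGo S (gC t j) j (min j (W-1) + 1 - (j + 1 - S.length)) (j + 1 - S.length) (vecOf S t W) =
      vecOf S (t.set j '?') W := by
  apply List.ext_getElem?
  intro w
  rw [decGo_getElem?, vecOf_getElem?, vecOf_getElem?]
  by_cases hw : w < W
  · rw [if_pos hw, if_pos hw, mcnt_set S t j hj hch w]
    by_cases hc : j + 1 - S.length ≤ w ∧ w < (j + 1 - S.length) + (min j (W-1) + 1 - (j + 1 - S.length)) ∧ gC S (j-w) ≠ gC t j
    · rw [if_pos hc, if_pos ⟨by omega, by omega, hc.2.2⟩]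
      rfl
    · rw [if_neg hc, if_neg (fun h => hc ⟨by omega, by omega, h.2.2⟩)]
  · rw [if_neg hw, if_neg hw]
    split_ifs <;> rfl

theorem repGo_acc (i : Nat) : ∀ rem k (c : Int) (t : List Char),
    repGo i rem k (c, t) = (c + (repGo i rem k (0, t)).1, (repGo i rem k (0, t)).2) := by
  intro rem
  induction rem with
  | zero => intro k c t; simp [repGo]
  | succ n ih =>
      intro k c t
      simp only [repGo]
      split_ifs with hP
      · rw [ih (k+1) (c+1), ih (k+1) (0+1)]
        have harith : c + 1 + (repGo i n (k+1) (0, t.set (i+k) '?')).1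
            = c + (0 + 1 + (repGo i n (k+1) (0, t.set (i+k) '?')).1) := by ring
        rw [harith]
      · exact ih (k+1) c t

theorem repGo_len (i : Nat) : ∀ rem k (c : Int) (t : List Char),
    ((repGo i rem k (c, t)).2).length = t.length := by
  intro rem
  induction rem with
  | zero => intro k c t; simp [repGo]
  | succ n ih =>
      intro k c t
      simp only [repGo]
      split_ifs with hP
      · rw [ih (k+1)]; simp
      · exact ih (k+1) c t

theorem stampGo_eq (S : List Char) (W i : Nat) (T : Nat) (hiW : i + S.length ≤ T) :
    ∀ rem k t (c : Int), k + rem = S.length → t.length = T →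
      stampGo S W i rem k (t, c, vecOf S t W) =
        ((repGo i rem k (0, t)).2, c + (repGo i rem k (0, t)).1, vecOf S (repGo i rem k (0, t)).2 W) := by
  intro rem
  induction rem with
  | zero => intro k t c _ _; simp [stampGo, repGo]
  | succ n ih =>
      intro k t c hk hT
      simp only [stampGo, repGo]
      by_cases hP : gC t (i+k) ≠ '?'
      · rw [if_pos hP, if_pos hP]
        have hjlen : i + k < t.length := by omega
        rw [decGo_vecOf S t W (i+k) hjlen hP]
        rw [ih (k+1) (t.set (i+k) '?') (c+1) (by omega) (by simp [hT])]
        rw [repGo_acc i n (k+1) (0+1) (t.set (i+k) '?')]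
        have harith : c + 1 + (repGo i n (k+1) (0, t.set (i+k) '?')).1
            = c + (0 + 1 + (repGo i n (k+1) (0, t.set (i+k) '?')).1) := by ring
        rw [harith]
      · rw [if_neg hP, if_neg hP]
        exact ih (k+1) t c (by omega) hT

theorem rndAB_eq (S : List Char) (W T : Nat) (hWT : ∀ i, i < W → i + S.length ≤ T)
    (pad : List Bool) :
    ∀ rem i t (vB : List Bool) (c : Int) (aA : List Int) (d : Bool),
      i + rem = W → t.length = T → vB.length = W →
      ∃ t' vB' c' aA' d',
        roundA S rem i (t, vB ++ pad, c, aA, d) = (t', vB' ++ pad, c', aA', d') ∧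
        roundB S W rem i (t, vB, c, vecOf S t W, aA.reverse, d) =
          (t', vB', c', vecOf S t' W, aA'.reverse, d') ∧
        t'.length = T ∧ vB'.length = W := by
  intro rem
  induction rem with
  | zero =>
      intro i t vB c aA d _ hT hV
      exact ⟨t, vB, c, aA, d, by simp [roundA], by simp [roundB], hT, hV⟩
  | succ n ih =>
      intro i t vB c aA d hiW hT hV
      have hi : i < W := by omega
      have hv : (vB ++ pad).getD i false = vB.getD i false := by
        rw [List.getD_eq_getElem?_getD, List.getD_eq_getElem?_getD,
            List.getElem?_append_left (by omega)]
      have hms : (vecOf S t W).getD i 0 = mcnt S t i := by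
        rw [List.getD_eq_getElem?_getD, vecOf_getElem?, if_pos hi]; rfl
      have hcan : (canGo S t i S.length 0 = true) ↔ (mcnt S t i = 0) := canGo_iff S t i S.length 0
      simp only [roundA, roundB]
      by_cases hg : vB.getD i false = false ∧ mcnt S t i = 0
      · rw [if_pos ⟨hv.trans hg.1, hcan.mpr hg.2⟩, if_pos ⟨hg.1, hms.trans hg.2⟩]
        rw [stampGo_eq S W i T (hWT i hi) S.length 0 t c (by omega) hT]
        rw [List.set_append_left i true (by omega)]
        have hrev : ((i:Int)) :: aA.reverse = (aA ++ [((i:Int))]).reverse := by simp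
        rw [hrev]
        exact ih (i+1) (repGo i S.length 0 (0, t)).2 (vB.set i true)
          (c + (repGo i S.length 0 (0, t)).1) (aA ++ [((i:Int))]) true
          (by omega) (by rw [repGo_len]; exact hT) (by simp [hV])
      · rw [if_neg (fun h => hg ⟨hv.symm.trans h.1, hcan.mp h.2⟩),
            if_neg (fun h => hg ⟨h.1, hms.symm.trans h.2⟩)]
        exact ih (i+1) t vB c aA d (by omega) hT hV

theorem lpAB_eq (S : List Char) (N : Int) (W T : Nat) (hWT : ∀ i, i < W → i + S.length ≤ T)
    (pad : List Bool) :
    ∀ fuel t (vB : List Bool) (c : Int) (aA : List Int),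
      t.length = T → vB.length = W →
      loopB S N W fuel (t, vB, c, vecOf S t W, aA.reverse) =
        loopA S N W fuel (t, vB ++ pad, c, aA) := by
  intro fuel
  induction fuel with
  | zero => intro t vB c aA _ _; simp [loopA, loopB]
  | succ n ih =>
      intro t vB c aA hT hV
      simp only [loopA, loopB]
      by_cases hc : c < N
      · rw [if_pos hc, if_pos hc]
        obtain ⟨t', vB', c', aA', d', hA, hB, hT', hV'⟩ :=
          rndAB_eq S W T hWT pad W 0 t vB c aA false (by omega) hT hV
        rw [hA, hB]
        cases d' with
        | false => rfl
        | true => exact ih t' vB' c' aA' hT' hV'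
      · rw [if_neg hc, if_neg hc]

-- ===== VERDICT (by name: the statement is the Claim_ definition above) =====
theorem movesToStamp_spec : Claim_equal_movesToStamp := by
  intro stamp target _ hpre
  unfold Spec_movesToStamp movesToStamp movesToStamp_alt
  dsimp only
  rcases hpre with hs | ht
  · have hM : 0 < stamp.toList.length := by
      rw [List.length_pos_iff]
      intro hnil
      apply hs
      have := congrArg String.ofList hnil
      simpa using this
    have hWle : ((target.toList.length : Int) - (stamp.toList.length : Int) + 1).toNat
        ≤ target.toList.length := by omega
    have hWT : ∀ i, i < ((target.toList.length : Int) - (stamp.toList.length : Int) + 1).toNat →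
        i + stamp.toList.length ≤ target.toList.length := by omega
    have hrepl : List.replicate target.toList.length false =
        List.replicate (((target.toList.length : Int) - (stamp.toList.length : Int) + 1).toNat) false ++
        List.replicate (target.toList.length -
          (((target.toList.length : Int) - (stamp.toList.length : Int) + 1).toNat)) false := by
      rw [← List.replicate_add]
      congr 1
      omega
    have hmiss : missInit stamp.toList target.toList
        (((target.toList.length : Int) - (stamp.toList.length : Int) + 1).toNat) 0 [] =
        vecOf stamp.toList target.toList
          (((target.toList.length : Int) - (stamp.toList.length : Int) + 1).toNat) := by
      rw [missInit_eq, vecOf, List.range_eq_range']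
      simp
    rw [hrepl, hmiss]
    exact (lpAB_eq stamp.toList (target.toList.length : Int) _ target.toList.length hWT _
      (target.toList.length + 2) target.toList _ 0 [] rfl (by simp)).symm
  · subst ht
    simp [loopA, loopB]
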